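-- pv_equiv track=rewrite | github.com/automainint/laplace | tools/build-deps.py | do_escapes
-- ===== SOURCE A (Python) =====
-- def do_escapes(s):
--   buf=''
--   esc=False
--   for c in s:
--     if not esc and c == '\\':
--       esc=True
--     else:
--       buf += c
--       esc=False
--   return buf
-- ===== SOURCE B (Python) =====
-- def do_escapes(s):
--   out = []
--   i = 0
--   n = len(s)
--   while i < n:
--     if s[i] == '\\':
--       i += 1
--       if i < n:
--         out.append(s[i])
--         i += 1
--     else:
--       out.append(s[i])
--       i += 1
--   return ''.join(out)
-- ===== Notes on version B (the rewrite author's own statement) =====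
-- stated objective: alternative
-- what changed: Replaces the esc boolean-flag fold with an index while-loop that consumes each backslash together with its escaped character in one step (list accumulator joined at the end), eliminating the per-character state toggle.
import Mathlib
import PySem

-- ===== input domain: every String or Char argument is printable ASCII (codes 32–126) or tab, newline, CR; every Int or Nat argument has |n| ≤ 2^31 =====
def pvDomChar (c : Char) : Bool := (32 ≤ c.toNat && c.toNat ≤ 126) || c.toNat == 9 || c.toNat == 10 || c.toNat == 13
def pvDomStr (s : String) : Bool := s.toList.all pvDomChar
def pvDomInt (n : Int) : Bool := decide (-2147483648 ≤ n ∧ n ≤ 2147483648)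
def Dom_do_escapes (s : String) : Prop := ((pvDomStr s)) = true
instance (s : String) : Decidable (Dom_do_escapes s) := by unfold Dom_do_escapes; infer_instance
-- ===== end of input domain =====

-- B replaces A's esc-flag fold by an index loop that consumes a backslash together
-- with its escaped character in one step (objective: alternative decomposition).

-- ===== PORT A =====
-- A: fold over the characters with state (buf, esc); 'buf += c' is String.push.
def doEscapesStep (st : String × Bool) (c : Char) : String × Bool :=
  if !st.2 && c == '\\' then (st.1, true) else (st.1.push c, false)

def do_escapes (s : String) : String :=
  (s.toList.foldl doEscapesStep ("", false)).1

-- ===== PORT B =====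
-- B: consume the input front-to-back; a backslash is consumed together with the
-- following character (if any), which is emitted; the char list is joined at the end.
def doEscapesGo : List Char → List Char
  | [] => []
  | c :: rest =>
    if c == '\\' then
      match rest with
      | [] => []
      | d :: rest' => d :: doEscapesGo rest'
    else c :: doEscapesGo rest

def do_escapes_alt (s : String) : String := String.ofList (doEscapesGo s.toList)

-- ===== PRECONDITION & SPEC =====
def Spec_do_escapes (s : String) (out : String) : Prop := out = do_escapes_alt s
instance (s : String) (out : String) : Decidable (Spec_do_escapes s out) := by unfold Spec_do_escapes; infer_instance

-- ===== CLAIM (what is proved, stated in full; the proofs are below) =====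
def Claim_equal_do_escapes : Prop := ∀ (s : String), Dom_do_escapes s → Spec_do_escapes s (do_escapes s)

-- ===== LEMMAS AND PROOFS =====

-- With esc = true the next character (whatever it is) is emitted and esc resets.
def doEscapesGoT : List Char → List Char
  | [] => []
  | d :: rest => d :: doEscapesGo rest

theorem doEscapes_push_app (b : String) (c : Char) : b.push c = b ++ String.ofList [c] :=
  (String.append_left_inj b).mp rfl

theorem doEscapes_step_esc (b : String) (c : Char) :
    doEscapesStep (b, true) c = (b.push c, false) := by simp [doEscapesStep]

theorem doEscapes_step_bs (b : String) :
    doEscapesStep (b, false) '\\' = (b, true) := by simp [doEscapesStep]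

theorem doEscapes_step_other (b : String) (c : Char) (h : c ≠ '\\') :
    doEscapesStep (b, false) c = (b.push c, false) := by simp [doEscapesStep, h]

theorem doEscapes_fold_eq :
    ∀ (l : List Char) (b : String),
      (l.foldl doEscapesStep (b, false)).1 = b ++ String.ofList (doEscapesGo l)
      ∧ (l.foldl doEscapesStep (b, true)).1 = b ++ String.ofList (doEscapesGoT l) := by
  intro l
  induction l with
  | nil =>
      intro b
      constructor <;> simp [doEscapesGo, doEscapesGoT]
  | cons c rest ih =>
      intro b
      constructor
      · by_cases h : c = '\\'
        · subst h
          rw [List.foldl_cons, doEscapes_step_bs, (ih b).2]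
          cases rest with
          | nil => simp [doEscapesGo, doEscapesGoT]
          | cons d r => simp [doEscapesGo, doEscapesGoT]
        · rw [List.foldl_cons, doEscapes_step_other b c h, (ih (b.push c)).1,
            show doEscapesGo (c :: rest) = c :: doEscapesGo rest from by
              rw [doEscapesGo.eq_def]; simp [h]]
          rw [doEscapes_push_app, String.append_assoc, ← String.ofList_append]
          rfl
      · rw [List.foldl_cons, doEscapes_step_esc, (ih (b.push c)).1]
        rw [show doEscapesGoT (c :: rest) = c :: doEscapesGo rest from rfl,
          doEscapes_push_app, String.append_assoc, ← String.ofList_append]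
        rfl

-- ===== VERDICT (by name: the statement is the Claim_ definition above) =====
theorem do_escapes_spec : Claim_equal_do_escapes := by
  intro s _
  unfold Spec_do_escapes do_escapes do_escapes_alt
  rw [(doEscapes_fold_eq s.toList "").1]
  simp
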